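-- pv_equiv track=rewrite | github.com/srejus/DSA | recursion/remove_adjacent_duplicates.py | func
-- ===== SOURCE A (Python) =====
-- def func(s):
--     if len(s) <= 1:
--         return s
--
--     i = 0
--     n = len(s)
--     new_s = []
--
--     while i < n:
--         if i < n-1 and s[i] == s[i+1]:
--             while i < n-1 and s[i] == s[i+1]:
--                 i += 1
--         else:
--             new_s.append(s[i])
--
--         i += 1
--
--     new_s = ''.join(new_s)
--     if s == new_s:
--         return s
--
--     return func(new_s)
-- ===== SOURCE B (Python) =====
-- def func(s):
--     t = s
--     while True:
--         groups = []
--         for ch in t: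
--             if groups and groups[-1][0] == ch:
--                 groups[-1] = (groups[-1][0], groups[-1][1] + 1)
--             else:
--                 groups.append((ch, 1))
--         out = ''.join(c for c, k in groups if k == 1)
--         if out == t:
--             return out
--         t = out
-- ===== Notes on version B (the rewrite author's own statement) =====
-- stated objective: idiomatic
-- what changed: B replaces A's index-based lookahead scan with nested while loops and tail recursion by an iterative fixpoint loop whose pass run-length-encodes the string once and keeps exactly the length-1 groups.
import Mathlib
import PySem

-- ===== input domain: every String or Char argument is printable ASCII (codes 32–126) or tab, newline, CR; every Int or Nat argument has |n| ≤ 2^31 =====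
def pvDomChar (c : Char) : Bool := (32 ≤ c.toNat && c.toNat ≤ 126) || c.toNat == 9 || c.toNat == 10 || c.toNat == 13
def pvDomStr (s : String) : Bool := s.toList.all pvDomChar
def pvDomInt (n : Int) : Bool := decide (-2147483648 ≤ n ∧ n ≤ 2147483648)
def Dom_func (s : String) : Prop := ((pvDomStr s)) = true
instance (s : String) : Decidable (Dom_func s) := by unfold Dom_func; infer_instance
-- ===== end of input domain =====

-- B replaces A's index-based lookahead scan (nested whiles + recursion) by an iterative
-- fixpoint loop whose pass run-length-encodes the string and keeps the length-1 groups;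
-- same cost class, proved to return the same string on every input.

-- ===== PORT A =====
-- inner `while i < n-1 and s[i] == s[i+1]: i += 1` followed by the outer `i += 1`,
-- viewed from the current character and the remaining suffix
def skipA : Char → List Char → List Char
  | _, [] => []
  | c, b :: t => if c == b then skipA b t else b :: t

theorem skipA_sublist (c : Char) (u : List Char) : (skipA c u).Sublist u := by
  induction u generalizing c with
  | nil => simp [skipA]
  | cons b t ih =>
      simp only [skipA]
      split
      · exact (ih b).trans (List.sublist_cons_self b t)
      · exact List.Sublist.refl _

-- outer `while i < n` loop of A, building new_s
def passA : List Char → List Char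
  | [] => []
  | [a] => [a]
  | a :: b :: t => if a == b then passA (skipA b t) else a :: passA (b :: t)
termination_by l => l.length
decreasing_by
  · have := (skipA_sublist b t).length_le; simp; omega
  · simp

theorem passA_sublist (l : List Char) : (passA l).Sublist l := by
  induction l using passA.induct with
  | case1 => simp [passA]
  | case2 a => simp [passA]
  | case3 a b t h ih =>
      rw [passA]; simp only [h, if_true]
      exact (ih.trans (skipA_sublist b t)).trans ((List.sublist_cons_self b t).trans (List.sublist_cons_self a (b :: t)))
  | case4 a b t h ih =>
      rw [passA]; simp only [h]
      exact ih.cons₂ a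

theorem passA_length_lt (l : List Char) (h : passA l ≠ l) : (passA l).length < l.length := by
  rcases Nat.lt_or_ge (passA l).length l.length with hlt | hge
  · exact hlt
  · exact absurd ((passA_sublist l).eq_of_length (Nat.le_antisymm (passA_sublist l).length_le hge)) h

def func (s : String) : String :=
  if PySem.Str.len s ≤ 1 then s
  else
    let new_s := String.ofList (passA s.toList)
    if s = new_s then s
    else func new_s
termination_by s.toList.length
decreasing_by
  rename_i hne
  simp only [String.toList_ofList]
  refine passA_length_lt _ (fun he => hne ?_)
  show s = String.ofList (passA s.toList)
  rw [he]; simp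

-- ===== PORT B =====
-- one step of the `for ch in t` loop over `groups` (kept in reverse: head = groups[-1])
def stepB : List (Char × Int) → Char → List (Char × Int)
  | [], c => [(c, 1)]
  | (d, k) :: t, c => if d == c then (d, k + 1) :: t else (c, 1) :: (d, k) :: t

def groupsB (l : List Char) : List (Char × Int) := (l.foldl stepB []).reverse

-- ''.join(c for c, k in groups if k == 1)
def keptB (gs : List (Char × Int)) : List Char := (gs.filter (fun p => p.2 == 1)).map Prod.fst

def passB (l : List Char) : List Char := keptB (groupsB l)

-- expansion of a group list back to characters (proof device for termination)
def expandB (gs : List (Char × Int)) : List Char := gs.flatMap (fun p => List.replicate p.2.toNat p.1)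

def posB (gs : List (Char × Int)) : Prop := ∀ p ∈ gs, 1 ≤ p.2

theorem posB_stepB (acc : List (Char × Int)) (c : Char) (h : posB acc) : posB (stepB acc c) := by
  match acc with
  | [] =>
      intro p hp
      have : p = (c, 1) := by simpa [stepB] using hp
      simp [this]
  | (d, k) :: t =>
      intro p hp
      simp only [stepB] at hp
      split at hp
      · rcases List.mem_cons.mp hp with h1 | h1
        · have := h (d, k) (by simp)
          subst h1; simp; omega
        · exact h p (List.mem_cons_of_mem _ h1)
      · rcases List.mem_cons.mp hp with h1 | h1
        · subst h1; simp
        · exact h p h1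

theorem expandB_stepB (acc : List (Char × Int)) (c : Char) (h : posB acc) :
    expandB (stepB acc c).reverse = expandB acc.reverse ++ [c] := by
  match acc with
  | [] => simp [stepB, expandB]
  | (d, k) :: t =>
      have hk : 1 ≤ k := h (d, k) (by simp)
      simp only [stepB]
      split
      · rename_i hdc
        have hrep : List.replicate (k + 1).toNat d = List.replicate k.toNat d ++ [d] := by
          have : (k + 1).toNat = k.toNat + 1 := by omega
          rw [this, List.replicate_succ']
        simp only [expandB, List.reverse_cons, List.flatMap_append, List.flatMap_cons,
          List.flatMap_nil, List.append_nil] at *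
        rw [hrep]
        have hdc' : d = c := by simpa using hdc
        simp [hdc']
      · simp [expandB, List.reverse_cons, List.flatMap_append]

theorem expandB_foldl (l : List Char) (acc : List (Char × Int)) (h : posB acc) :
    expandB (l.foldl stepB acc).reverse = expandB acc.reverse ++ l := by
  induction l generalizing acc with
  | nil => simp
  | cons c t ih =>
      rw [List.foldl_cons, ih (stepB acc c) (posB_stepB acc c h), expandB_stepB acc c h]
      simp

theorem expandB_groupsB (l : List Char) : expandB (groupsB l) = l := by
  have := expandB_foldl l [] (by intro p hp; simp at hp)
  simpa [groupsB, expandB] using this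

theorem keptB_sublist_expandB (gs : List (Char × Int)) : (keptB gs).Sublist (expandB gs) := by
  induction gs with
  | nil => simp [keptB, expandB]
  | cons p t ih =>
      obtain ⟨c, k⟩ := p
      by_cases hk : k = 1
      · subst hk
        simpa [keptB, expandB, List.replicate] using ih.cons₂ c
      · have hk' : (k == (1 : Int)) = false := by simpa using hk
        simp only [keptB, expandB, List.flatMap_cons, List.filter_cons, hk']
        exact List.Sublist.trans ih (List.sublist_append_right _ _)

theorem passB_sublist (l : List Char) : (passB l).Sublist l := by
  have := keptB_sublist_expandB (groupsB l)
  rwa [expandB_groupsB] at this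

theorem passB_length_lt (l : List Char) (h : passB l ≠ l) : (passB l).length < l.length := by
  rcases Nat.lt_or_ge (passB l).length l.length with hlt | hge
  · exact hlt
  · exact absurd ((passB_sublist l).eq_of_length (Nat.le_antisymm (passB_sublist l).length_le hge)) h

def func_alt (s : String) : String :=
  let out := String.ofList (passB s.toList)
  if out = s then out
  else func_alt out
termination_by s.toList.length
decreasing_by
  rename_i hne
  simp only [String.toList_ofList]
  refine passB_length_lt _ (fun he => hne ?_)
  show String.ofList (passB s.toList) = s
  rw [he]; simp

-- ===== PRECONDITION & SPEC =====
def Spec_func (s : String) (out : String) : Prop := out = func_alt s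
instance (s : String) (out : String) : Decidable (Spec_func s out) := by unfold Spec_func; infer_instance

-- ===== CLAIM (what is proved, stated in full; the proofs are below) =====
def Claim_equal_func : Prop := ∀ (s : String), Dom_func s → Spec_func s (func s)

-- ===== LEMMAS AND PROOFS =====

-- reference run-length encoding of a string
def rleC : List Char → List (Char × Int)
  | [] => []
  | a :: t => (a, 1 + ((t.takeWhile (· == a)).length : Int)) :: rleC (t.dropWhile (· == a))
termination_by l => l.length
decreasing_by
  have := (List.dropWhile_sublist (l := t) (p := (· == a))).length_le
  simp; omega

theorem foldl_stepB_rle (l : List Char) (c : Char) (k : Int) (rest : List (Char × Int)) :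
    (l.foldl stepB ((c, k) :: rest)).reverse
      = rest.reverse ++ (c, k + ((l.takeWhile (· == c)).length : Int)) :: rleC (l.dropWhile (· == c)) := by
  induction l generalizing c k rest with
  | nil => simp [rleC]
  | cons x v ih =>
      by_cases hcx : c = x
      · subst hcx
        rw [List.foldl_cons]
        simp only [stepB, beq_self_eq_true, if_true]
        rw [ih c (k + 1) rest]
        simp only [List.takeWhile_cons, beq_self_eq_true, if_true, List.dropWhile_cons,
          List.length_cons]
        push_cast
        ring_nf
      · have hx : (x == c) = false := by simpa using fun h => hcx h.symm
        rw [List.foldl_cons]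
        simp only [stepB, show (c == x) = false by simpa using hcx, Bool.false_eq_true, if_false]
        rw [ih x 1 ((c, k) :: rest)]
        have hr : rleC (x :: v)
            = (x, 1 + ((v.takeWhile (· == x)).length : Int)) :: rleC (v.dropWhile (· == x)) := by
          rw [rleC]
        simp only [List.takeWhile_cons, hx, Bool.false_eq_true, if_false, List.dropWhile_cons]
        rw [hr]
        simp

theorem groupsB_eq_rleC (l : List Char) : groupsB l = rleC l := by
  cases l with
  | nil => simp [groupsB, rleC]
  | cons a t =>
      simp only [groupsB, List.foldl_cons, stepB]
      rw [foldl_stepB_rle t a 1 []]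
      simp [rleC]

theorem skipA_eq_dropWhile (u : List Char) (c : Char) : skipA c u = u.dropWhile (· == c) := by
  induction u generalizing c with
  | nil => simp [skipA]
  | cons x v ih =>
      by_cases hcx : c = x
      · subst hcx
        simp [skipA, ih]
      · simp [skipA, show (c == x) = false by simpa using hcx,
          show (x == c) = false by simpa using fun h => hcx h.symm]

theorem passA_eq_keptB_rleC (l : List Char) : passA l = keptB (rleC l) := by
  induction l using passA.induct with
  | case1 => simp [passA, rleC, keptB]
  | case2 a => simp [passA, rleC, keptB]
  | case3 a b t h ih =>
      have hab : a = b := by simpa using h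
      rw [passA]; simp only [h, if_true]
      rw [ih, skipA_eq_dropWhile]
      have hk : ((1 : Int) + ((((b :: t).takeWhile (· == a)).length : Nat) : Int) == 1) = false := by
        subst hab
        simp only [List.takeWhile_cons, beq_self_eq_true, if_true, List.length_cons]
        simp only [beq_eq_false_iff_ne, ne_eq]
        push_cast
        omega
      rw [rleC]
      simp only [keptB, List.filter_cons, hk]
      subst hab
      simp
  | case4 a b t h ih =>
      have hab : ¬ a = b := by simpa using h
      rw [passA]; simp only [h]
      have hba : (b == a) = false := by simpa using fun hh => hab hh.symm
      rw [rleC]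
      simp only [List.takeWhile_cons, hba, List.dropWhile_cons, keptB, List.filter_cons]
      simp [keptB] at ih
      simp [ih]

theorem passA_eq_passB (l : List Char) : passA l = passB l := by
  rw [passA_eq_keptB_rleC, passB, groupsB_eq_rleC]

theorem func_alt_fix (s : String) (h : passB s.toList = s.toList) : func_alt s = s := by
  rw [func_alt.eq_def]
  simp [h]

theorem funcs_eq (s : String) : func s = func_alt s := by
  generalize hn : s.toList.length = n
  induction n using Nat.strong_induction_on generalizing s with
  | _ n IH =>
      rw [func.eq_def]
      by_cases hlen : PySem.Str.len s ≤ 1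
      · rw [if_pos hlen]
        refine (func_alt_fix s ?_).symm
        have hlen' : s.toList.length ≤ 1 := by
          have : PySem.Str.len s = (s.toList.length : Int) := by simp [PySem.Str.len]
          omega
        rw [← passA_eq_passB]
        match hl : s.toList with
        | [] => simp [passA]
        | [a] => simp [passA]
        | a :: b :: t => rw [hl] at hlen'; simp at hlen'
      · rw [if_neg hlen]
        simp only
        by_cases heq : s = String.ofList (passA s.toList)
        · rw [if_pos heq]
          refine (func_alt_fix s ?_).symm
          rw [← passA_eq_passB]
          conv_rhs => rw [heq]
          simp
        · rw [if_neg heq]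
          rw [func_alt.eq_def]
          have hpass : ¬ String.ofList (passB s.toList) = s := by
            rw [← passA_eq_passB]
            exact fun h => heq h.symm
          simp only [hpass, if_false]
          rw [passA_eq_passB]
          have hlt : (String.ofList (passB s.toList)).toList.length < n := by
            rw [String.toList_ofList, ← hn]
            refine passB_length_lt _ (fun he => hpass ?_)
            rw [he]; simp
          exact IH _ hlt _ rfl

-- ===== VERDICT (by name: the statement is the Claim_ definition above) =====
theorem func_spec : Claim_equal_func := by
  intro s _
  unfold Spec_func
  exact funcs_eq s
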